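-- pv_equiv track=rewrite | github.com/jackmazac/john-inventory | app/validators/column_detector.py | detect_column_mapping
-- ===== SOURCE A (Python) =====
-- from typing import Dict, List, Optional
--
-- FIELD_PATTERNS = {
--     "asset_tag": ["asset tag", "asset_tag", "asset", "computer name", "computer_name", "tag", "id"],
--     "computer_name": ["computer name", "computer_name", "name", "hostname"],
--     "department": ["department", "dept", "division", "group"],
--     "assigned_user_name": ["user", "username", "assigned to", "assigned_to", "user name", "user_name", "employee", "owner"],
--     "assigned_user_id": ["user id", "user_id", "employee id", "employee_id", "userid"],
--     "operating_system": ["os", "operating system", "operating_system", "platform"],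
--     "serial_number": ["serial", "serial number", "serial_number", "sn"],
--     "status": ["status", "state"],
--     "notes": ["notes", "note", "comments", "comment", "description"],
-- }
--
-- def detect_column_mapping(source_columns: List[str]) -> Dict[str, Optional[str]]:
--     """Auto-detect column mappings from source column names."""
--     mapping = {}
--     source_lower = [col.lower().strip() for col in source_columns]
--
--     for target_field, patterns in FIELD_PATTERNS.items():
--         matched = None
--         for pattern in patterns:
--             for i, source_col in enumerate(source_lower):
--                 if pattern in source_col:
--                     matched = source_columns[i]
--                     break
--             if matched:
--                 break
--         mapping[target_field] = matched
--
--     return mapping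
-- ===== SOURCE B (Python) =====
-- from typing import Dict, List, Optional
--
-- FIELD_PATTERNS = {
--     "asset_tag": ["asset tag", "asset_tag", "asset", "computer name", "computer_name", "tag", "id"],
--     "computer_name": ["computer name", "computer_name", "name", "hostname"],
--     "department": ["department", "dept", "division", "group"],
--     "assigned_user_name": ["user", "username", "assigned to", "assigned_to", "user name", "user_name", "employee", "owner"],
--     "assigned_user_id": ["user id", "user_id", "employee id", "employee_id", "userid"],
--     "operating_system": ["os", "operating system", "operating_system", "platform"],
--     "serial_number": ["serial", "serial number", "serial_number", "sn"],
--     "status": ["status", "state"],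
--     "notes": ["notes", "note", "comments", "comment", "description"],
-- }
--
-- def detect_column_mapping(source_columns: List[str]) -> Dict[str, Optional[str]]:
--     """Auto-detect column mappings from source column names (column-scan + argmin)."""
--     lowered = [col.lower().strip() for col in source_columns]
--     mapping = {}
--     for target_field, patterns in FIELD_PATTERNS.items():
--         best = None  # (first_matching_pattern_index, column_index, original column)
--         for ci, (orig, low) in enumerate(zip(source_columns, lowered)):
--             pi = next((j for j, p in enumerate(patterns) if p in low), None)
--             if pi is not None and (best is None or (pi, ci) < (best[0], best[1])):
--                 best = (pi, ci, orig)
--         mapping[target_field] = best[2] if best is not None else None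
--     return mapping
-- ===== Notes on version B (the rewrite author's own statement) =====
-- stated objective: alternative
-- what changed: Replaces A's pattern-outer nested scan with first-match-and-break by a single pass over the columns computing each column's first-matching-pattern index and keeping the argmin of (pattern_index, column_index).
import Mathlib
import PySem

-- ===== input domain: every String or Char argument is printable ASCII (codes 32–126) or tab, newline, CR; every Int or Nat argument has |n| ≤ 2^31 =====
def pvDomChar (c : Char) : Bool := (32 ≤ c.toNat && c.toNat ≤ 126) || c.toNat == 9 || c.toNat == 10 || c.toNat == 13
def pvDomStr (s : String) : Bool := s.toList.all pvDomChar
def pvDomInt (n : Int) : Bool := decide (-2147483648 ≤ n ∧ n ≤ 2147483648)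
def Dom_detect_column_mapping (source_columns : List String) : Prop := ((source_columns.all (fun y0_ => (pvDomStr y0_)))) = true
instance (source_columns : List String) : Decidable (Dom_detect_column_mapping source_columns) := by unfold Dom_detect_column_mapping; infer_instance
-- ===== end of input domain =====

-- B replaces A's pattern-outer nested scan (first-match + break) by a single column scan keeping the
-- argmin of (first-matching-pattern-index, column-index); same results, a different decomposition.

-- ===== PORT A =====
-- module constant FIELD_PATTERNS (dict iterated in insertion order)
def FIELD_PATTERNS : List (String × List String) := [
  ("asset_tag", ["asset tag", "asset_tag", "asset", "computer name", "computer_name", "tag", "id"]),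
  ("computer_name", ["computer name", "computer_name", "name", "hostname"]),
  ("department", ["department", "dept", "division", "group"]),
  ("assigned_user_name", ["user", "username", "assigned to", "assigned_to", "user name", "user_name", "employee", "owner"]),
  ("assigned_user_id", ["user id", "user_id", "employee id", "employee_id", "userid"]),
  ("operating_system", ["os", "operating system", "operating_system", "platform"]),
  ("serial_number", ["serial", "serial number", "serial_number", "sn"]),
  ("status", ["status", "state"]),
  ("notes", ["notes", "note", "comments", "comment", "description"])]

-- col.lower().strip()
def pyLow (col : String) : String := PySem.Str.strip (PySem.Str.lower col)

-- Python truthiness of 'matched' (an Optional[str])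
def pyTruthyStr : Option String → Bool
  | some s => s != ""
  | none => false

-- inner loop: 'for i, source_col in enumerate(source_lower): if pattern in source_col: matched = source_columns[i]; break'
-- (transliterated over the zip of source_columns with source_lower: the same scan, matched = the original column)
def aScan (pattern : String) : List (String × String) → Option String → Option String
  | [], matched => matched
  | (orig, low) :: rest, matched =>
      if PySem.Str.isIn pattern low then some orig else aScan pattern rest matched

-- outer loop: 'for pattern in patterns: …; if matched: break'
def aField : List String → List (String × String) → Option String → Option String
  | [], _, matched => matched
  | p :: ps, pairs, matched =>
      let matched' := aScan p pairs matched
      if pyTruthyStr matched' then matched' else aField ps pairs matched'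

def detect_column_mapping (source_columns : List String) : List (String × Option String) :=
  let source_lower := source_columns.map pyLow
  (FIELD_PATTERNS.foldl (fun mapping fp =>
      PySem.Dict.insert mapping fp.1 (aField fp.2 (source_columns.zip source_lower) none))
    PySem.Dict.empty).items

-- ===== PORT B =====
-- next((j for j, p in enumerate(patterns) if p in low), None)
def bFirst (patterns : List String) (j : Nat) (low : String) : Option Nat :=
  match patterns with
  | [] => none
  | p :: ps => if PySem.Str.isIn p low then some j else bFirst ps (j + 1) low

-- 'for ci, (orig, low) in enumerate(zip(source_columns, lowered)): …' keeping best = (pi, ci, orig)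
def bLoop (patterns : List String) : Nat → List (String × String) → Option (Nat × Nat × String) → Option (Nat × Nat × String)
  | _, [], best => best
  | ci, (orig, low) :: rest, best =>
      match bFirst patterns 0 low with
      | none => bLoop patterns (ci + 1) rest best
      | some pi =>
          match best with
          | none => bLoop patterns (ci + 1) rest (some (pi, ci, orig))
          | some (bp, bc, bo) =>
              if pi < bp ∨ (pi = bp ∧ ci < bc) then bLoop patterns (ci + 1) rest (some (pi, ci, orig))
              else bLoop patterns (ci + 1) rest (some (bp, bc, bo))

-- 'best[2] if best is not None else None'
def bThird : Option (Nat × Nat × String) → Option String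
  | none => none
  | some b => some b.2.2

def detect_column_mapping_alt (source_columns : List String) : List (String × Option String) :=
  let lowered := source_columns.map pyLow
  (FIELD_PATTERNS.foldl (fun mapping fp =>
      PySem.Dict.insert mapping fp.1 (bThird (bLoop fp.2 0 (source_columns.zip lowered) none)))
    PySem.Dict.empty).items

-- ===== PRECONDITION & SPEC =====
def Spec_detect_column_mapping (source_columns : List String) (out : List (String × Option String)) : Prop := out = detect_column_mapping_alt source_columns
instance (source_columns : List String) (out : List (String × Option String)) : Decidable (Spec_detect_column_mapping source_columns out) := by unfold Spec_detect_column_mapping; infer_instance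

-- ===== CLAIM (what is proved, stated in full; the proofs are below) =====
def Claim_equal_detect_column_mapping : Prop := ∀ (source_columns : List String), Dom_detect_column_mapping source_columns → Spec_detect_column_mapping source_columns (detect_column_mapping source_columns)

-- ===== LEMMAS AND PROOFS =====

-- first original column whose lowered form contains p (A's inner scan from matched = none)
def scanFirst (p : String) : List (String × String) → Option String
  | [] => none
  | (orig, low) :: rest => if PySem.Str.isIn p low then some orig else scanFirst p rest

-- common characterization: (index of first pattern with a match, first matching original column)
def hPat : List String → Nat → List (String × String) → Option (Nat × String)
  | [], _, _ => none
  | p :: ps, k, z =>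
      match scanFirst p z with
      | some o => some (k, o)
      | none => hPat ps (k + 1) z

-- left-biased min by pattern index
def cmb : Option (Nat × String) → Option (Nat × String) → Option (Nat × String)
  | none, y => y
  | some x, none => some x
  | some x, some y => if y.1 < x.1 then some y else some x

-- column-fold form of B's argmin
def gFold (ps : List String) : List (String × String) → Option (Nat × String)
  | [] => none
  | (o, l) :: rest => cmb ((bFirst ps 0 l).map (fun pi => (pi, o))) (gFold ps rest)

theorem aScan_none (p : String) (z : List (String × String)) : aScan p z none = scanFirst p z := by
  induction z with
  | nil => rfl
  | cons hd tl ih =>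
      obtain ⟨o, l⟩ := hd
      rw [aScan, scanFirst]
      by_cases hin : PySem.Str.isIn p l = true
      · rw [if_pos hin, if_pos hin]
      · rw [if_neg hin, if_neg hin, ih]

theorem scanFirst_some (p : String) (z : List (String × String)) (o : String)
    (h : scanFirst p z = some o) : ∃ l, (o, l) ∈ z ∧ PySem.Str.isIn p l = true := by
  induction z with
  | nil => simp [scanFirst] at h
  | cons hd tl ih =>
      obtain ⟨a, b⟩ := hd
      rw [scanFirst] at h
      by_cases hin : PySem.Str.isIn p b = true
      · rw [if_pos hin] at h
        refine ⟨b, ?_, hin⟩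
        injection h with h'
        simp [h']
      · rw [if_neg hin] at h
        obtain ⟨l, hl, hc⟩ := ih h
        exact ⟨l, by simp [hl], hc⟩

-- a nonempty pattern contained in the lowered column forces a truthy original
theorem match_truthy (p o l : String) (hp : p ≠ "")
    (hlink : l = pyLow o) (hin : PySem.Str.isIn p l = true) : o ≠ "" := by
  intro ho
  subst ho hlink
  rw [PySem.Str.isIn_iff_infix] at hin
  have h0 : (pyLow "").toList = [] := by decide
  rw [h0] at hin
  exact hp (String.toList_eq_nil_iff.mp (List.eq_nil_of_infix_nil hin))

theorem aField_eq_hPat (ps : List String) (z : List (String × String)) (k : Nat)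
    (Hz : ∀ pr ∈ z, pr.2 = pyLow pr.1) (Hp : ∀ p ∈ ps, p ≠ "") :
    aField ps z none = (hPat ps k z).map (·.2) := by
  induction ps generalizing k with
  | nil => rfl
  | cons p ps ih =>
      have hp : p ≠ "" := Hp p (by simp)
      rw [aField, aScan_none, hPat]
      cases hsf : scanFirst p z with
      | some o =>
          obtain ⟨l, hmem, hin⟩ := scanFirst_some p z o hsf
          have ho : o ≠ "" := match_truthy p o l hp (Hz (o, l) hmem) hin
          simp [pyTruthyStr, ho]
      | none =>
          simp only [pyTruthyStr, Bool.false_eq_true, if_false]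
          exact ih (k + 1) (fun q hq => Hp q (by simp [hq]))

theorem cmb_assoc (a b c : Option (Nat × String)) : cmb (cmb a b) c = cmb a (cmb b c) := by
  cases a <;> cases b <;> cases c <;> simp only [cmb] <;> (try rfl) <;>
    split_ifs <;> simp only [cmb] <;> (try split_ifs) <;> (try rfl) <;> omega

theorem bLoop_eq_gFold (ps : List String) (z : List (String × String)) (ci : Nat)
    (best : Option (Nat × Nat × String)) (hb : ∀ r, best = some r → r.2.1 < ci) :
    (bLoop ps ci z best).map (fun b => (b.1, b.2.2)) =
      cmb (best.map (fun b => (b.1, b.2.2))) (gFold ps z) := by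
  induction z generalizing ci best with
  | nil => cases best <;> simp [bLoop, gFold, cmb]
  | cons hd tl ih =>
      obtain ⟨o, l⟩ := hd
      rw [gFold]
      cases hf : bFirst ps 0 l with
      | none =>
          simp only [bLoop, hf]
          rw [ih (ci + 1) best (fun r hr => Nat.lt_succ_of_lt (hb r hr))]
          cases best <;> simp [cmb]
      | some pi =>
          simp only [bLoop, hf]
          cases best with
          | none =>
              rw [ih (ci + 1) (some (pi, ci, o))
                    (fun r hr => by injection hr with h; subst h; exact Nat.lt_succ_self ci)]
              simp [cmb]
          | some b =>
              obtain ⟨bp, bc, bo⟩ := b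
              have hbc : bc < ci := hb (bp, bc, bo) rfl
              have hcond : (pi < bp ∨ (pi = bp ∧ ci < bc)) ↔ pi < bp := by omega
              dsimp only
              by_cases hlt : pi < bp
              · rw [if_pos (hcond.mpr hlt)]
                rw [ih (ci + 1) (some (pi, ci, o))
                      (fun r hr => by injection hr with h; subst h; exact Nat.lt_succ_self ci)]
                rw [← cmb_assoc]
                simp [cmb, hlt]
              · rw [if_neg (fun h => hlt (hcond.mp h))]
                rw [ih (ci + 1) (some (bp, bc, bo))
                      (fun r hr => by injection hr with h; subst h; exact Nat.lt_succ_of_lt hbc)]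
                rw [← cmb_assoc]
                simp [cmb, hlt]

theorem bFirst_le (ps : List String) (k : Nat) (l : String) (pi : Nat)
    (h : bFirst ps k l = some pi) : k ≤ pi := by
  induction ps generalizing k with
  | nil => simp [bFirst] at h
  | cons p ps ih =>
      rw [bFirst] at h
      by_cases hin : PySem.Str.isIn p l = true
      · rw [if_pos hin] at h; injection h with h'; omega
      · rw [if_neg hin] at h; exact Nat.le_of_succ_le (ih (k + 1) h)

theorem hPat_nil (ps : List String) (k : Nat) : hPat ps k [] = none := by
  induction ps generalizing k with
  | nil => rfl
  | cons p ps ih => rw [hPat]; exact ih (k + 1)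

theorem hPat_le (ps : List String) (k : Nat) (z : List (String × String)) (r : Nat × String)
    (h : hPat ps k z = some r) : k ≤ r.1 := by
  induction ps generalizing k with
  | nil => simp [hPat] at h
  | cons p ps ih =>
      rw [hPat] at h
      cases hsf : scanFirst p z with
      | some o => rw [hsf] at h; injection h with h'; subst h'; simp
      | none => rw [hsf] at h; exact Nat.le_of_succ_le (ih (k + 1) h)

theorem cmb_hPat (ps : List String) (k : Nat) (o l : String) (rest : List (String × String)) :
    cmb ((bFirst ps k l).map (fun pi => (pi, o))) (hPat ps k rest) = hPat ps k ((o, l) :: rest) := by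
  induction ps generalizing k with
  | nil => simp [hPat, bFirst, cmb]
  | cons p ps ih =>
      rw [bFirst, hPat, hPat, scanFirst]
      by_cases hin : PySem.Str.isIn p l = true
      · rw [if_pos hin, if_pos hin]
        cases hr : scanFirst p rest with
        | some o' =>
            simp [cmb]
        | none =>
            cases hh : hPat ps (k + 1) rest with
            | none => simp [cmb]
            | some r =>
                have hk := hPat_le ps (k + 1) rest r hh
                simp only [Option.map_some, cmb]
                rw [if_neg (by omega)]
      · rw [if_neg hin, if_neg hin]
        cases hr : scanFirst p rest with
        | some o' =>
            cases hf : bFirst ps (k + 1) l with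
            | none => simp [cmb]
            | some pi =>
                have hk := bFirst_le ps (k + 1) l pi hf
                simp only [Option.map_some, cmb]
                rw [if_pos (by omega)]
        | none => exact ih (k + 1)

theorem gFold_eq_hPat (ps : List String) (z : List (String × String)) :
    gFold ps z = hPat ps 0 z := by
  induction z with
  | nil => rw [gFold, hPat_nil]
  | cons hd tl ih =>
      obtain ⟨o, l⟩ := hd
      rw [gFold, ih, cmb_hPat]

theorem zip_map_link (cs : List String) (pr : String × String)
    (h : pr ∈ cs.zip (cs.map pyLow)) : pr.2 = pyLow pr.1 := by
  induction cs with
  | nil => simp at h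
  | cons c cs ih =>
      rw [List.map_cons, List.zip_cons_cons] at h
      rcases List.mem_cons.mp h with h | h
      · rw [h]
      · exact ih h

-- per-field equality: A's nested scan = B's argmin scan
theorem field_eq (source_columns : List String) (ps : List String)
    (Hp : ps.all (fun p => p != "") = true) :
    aField ps (source_columns.zip (source_columns.map pyLow)) none =
      bThird (bLoop ps 0 (source_columns.zip (source_columns.map pyLow)) none) := by
  have Hp' : ∀ p ∈ ps, p ≠ "" := by
    intro p hp
    simpa using List.all_eq_true.mp Hp p hp
  have hA := aField_eq_hPat ps (source_columns.zip (source_columns.map pyLow)) 0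
    (fun pr hpr => zip_map_link source_columns pr hpr) Hp'
  have hB := bLoop_eq_gFold ps (source_columns.zip (source_columns.map pyLow)) 0 none
    (fun r hr => by cases hr)
  rw [gFold_eq_hPat] at hB
  rw [hA]
  cases hbl : bLoop ps 0 (source_columns.zip (source_columns.map pyLow)) none with
  | none =>
      rw [hbl] at hB
      have : hPat ps 0 (source_columns.zip (source_columns.map pyLow)) = none := by
        simpa [cmb] using hB.symm
      rw [this]; rfl
  | some b =>
      rw [hbl] at hB
      have : hPat ps 0 (source_columns.zip (source_columns.map pyLow)) = some (b.1, b.2.2) := by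
        simpa [cmb] using hB.symm
      rw [this]; rfl

-- ===== VERDICT (by name: the statement is the Claim_ definition above) =====
theorem detect_column_mapping_spec : Claim_equal_detect_column_mapping := by
  intro source_columns _
  unfold Spec_detect_column_mapping detect_column_mapping detect_column_mapping_alt
  simp only [FIELD_PATTERNS, List.foldl]
  rw [field_eq source_columns ["asset tag", "asset_tag", "asset", "computer name", "computer_name", "tag", "id"] (by decide),
      field_eq source_columns ["computer name", "computer_name", "name", "hostname"] (by decide),
      field_eq source_columns ["department", "dept", "division", "group"] (by decide),
      field_eq source_columns ["user", "username", "assigned to", "assigned_to", "user name", "user_name", "employee", "owner"] (by decide),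
      field_eq source_columns ["user id", "user_id", "employee id", "employee_id", "userid"] (by decide),
      field_eq source_columns ["os", "operating system", "operating_system", "platform"] (by decide),
      field_eq source_columns ["serial", "serial number", "serial_number", "sn"] (by decide),
      field_eq source_columns ["status", "state"] (by decide),
      field_eq source_columns ["notes", "note", "comments", "comment", "description"] (by decide)]
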